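-- pv_equiv track=rewrite | github.com/isaac-sim/IsaacLab | source/isaaclab/isaaclab/devices/openxr/manus_vive_utils.py | get_vive_wrist_ids
-- ===== SOURCE A (Python) =====
-- def get_vive_wrist_ids(vive_data: dict) -> tuple[str, str]:
--     """Get the Vive wrist tracker IDs if available.
--
--     Args:
--         vive_data: The raw Vive data dictionary.
--
--     Returns:
--         (wm0_id, wm1_id) if available, otherwise None values.
--     """
--     wm_ids = [k for k in vive_data.keys() if len(k) >= 2 and k[:2] == "WM"]
--     wm_ids.sort()
--     if len(wm_ids) >= 2:  # Assumes the first two vive trackers are the wrist trackers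
--         return wm_ids[0], wm_ids[1]
--     if len(wm_ids) == 1:
--         return wm_ids[0], None
--     return None, None
-- ===== SOURCE B (Python) =====
-- def get_vive_wrist_ids(vive_data: dict) -> tuple[str, str]:
--     """Get the Vive wrist tracker IDs if available.
--
--     Single linear pass: keep the smallest and second-smallest "WM"-prefixed
--     keys in two running variables instead of building and sorting a list.
--     """
--     lo = hi = None
--     for k in vive_data.keys():
--         if not k.startswith("WM"):
--             continue
--         if lo is None:
--             lo = k
--         elif hi is None:
--             if k < lo:
--                 lo, hi = k, lo
--             else:
--                 hi = k
--         elif k < lo: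
--             lo, hi = k, lo
--         elif k < hi:
--             hi = k
--     return lo, hi
-- ===== Notes on version B (the rewrite author's own statement) =====
-- stated objective: alternative
-- what changed: Replaces build-list-then-sort with a single linear scan that maintains the smallest and second-smallest 'WM'-prefixed keys in two running variables.
import Mathlib
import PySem

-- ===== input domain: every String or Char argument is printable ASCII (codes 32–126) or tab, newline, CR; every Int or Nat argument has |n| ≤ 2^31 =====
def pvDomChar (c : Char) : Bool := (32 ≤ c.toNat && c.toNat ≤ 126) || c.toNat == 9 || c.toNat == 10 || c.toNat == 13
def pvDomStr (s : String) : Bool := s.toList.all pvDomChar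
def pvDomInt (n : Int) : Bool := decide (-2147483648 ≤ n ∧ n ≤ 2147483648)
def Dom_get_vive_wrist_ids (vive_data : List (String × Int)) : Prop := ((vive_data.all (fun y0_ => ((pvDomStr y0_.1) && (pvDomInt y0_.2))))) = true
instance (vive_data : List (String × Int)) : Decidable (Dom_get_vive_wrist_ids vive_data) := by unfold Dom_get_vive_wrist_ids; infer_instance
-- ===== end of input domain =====

-- B replaces sort-then-take-two by a one-pass scan keeping the two smallest 'WM' keys in two running variables (alternative algorithm; no measured speed claim).

-- ===== PORT A =====
def get_vive_wrist_ids (vive_data : List (String × Int)) : Option String × Option String :=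
  let wm_ids := ((PySem.Dict.ofList vive_data).keys).filter
      (fun k => decide (2 ≤ PySem.Str.len k) && (PySem.Str.slice k none (some 2) == "WM"))
  match PySem.List.sorted wm_ids (fun x => x) false with
  | a :: b :: _ => (some a, some b)
  | [a] => (some a, none)
  | [] => (none, none)

-- ===== PORT B =====
-- loop body of Source B: skip non-'WM' keys, otherwise update the two running minima
def pvStepB (st : Option String × Option String) (k : String) : Option String × Option String :=
  if PySem.Str.startswith k "WM" then
    match st with
    | (none, _) => (some k, none)
    | (some lo, none) => if k < lo then (some k, some lo) else (some lo, some k)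
    | (some lo, some hi) =>
        if k < lo then (some k, some lo)
        else if k < hi then (some lo, some k)
        else (some lo, some hi)
  else st

def get_vive_wrist_ids_alt (vive_data : List (String × Int)) : Option String × Option String :=
  ((PySem.Dict.ofList vive_data).keys).foldl pvStepB (none, none)

-- ===== PRECONDITION & SPEC =====
def Spec_get_vive_wrist_ids (vive_data : List (String × Int)) (out : Option String × Option String) : Prop := out = get_vive_wrist_ids_alt vive_data
instance (vive_data : List (String × Int)) (out : Option String × Option String) : Decidable (Spec_get_vive_wrist_ids vive_data out) := by unfold Spec_get_vive_wrist_ids; infer_instance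

-- ===== CLAIM (what is proved, stated in full; the proofs are below) =====
def Claim_equal_get_vive_wrist_ids : Prop := ∀ (vive_data : List (String × Int)), Dom_get_vive_wrist_ids vive_data → Spec_get_vive_wrist_ids vive_data (get_vive_wrist_ids vive_data)

-- ===== LEMMAS AND PROOFS =====

-- first two elements of a list, as the pair of Options A's final branches return
def pvFirstTwo (l : List String) : Option String × Option String :=
  match l with
  | a :: b :: _ => (some a, some b)
  | [a] => (some a, none)
  | [] => (none, none)

-- the scan step on a key that did pass the filter
def pvStep2 (st : Option String × Option String) (k : String) : Option String × Option String :=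
  match st with
  | (none, _) => (some k, none)
  | (some lo, none) => if k < lo then (some k, some lo) else (some lo, some k)
  | (some lo, some hi) =>
      if k < lo then (some k, some lo)
      else if k < hi then (some lo, some k)
      else (some lo, some hi)

theorem pvStepB_eq (st : Option String × Option String) (k : String) :
    pvStepB st k = if PySem.Str.startswith k "WM" = true then pvStep2 st k else st := by
  by_cases h : PySem.Str.startswith k "WM" = true <;> simp [pvStepB, pvStep2]

theorem pvFoldB_filter (l : List String) (init : Option String × Option String) :
    l.foldl pvStepB init = (l.filter (fun k => PySem.Str.startswith k "WM")).foldl pvStep2 init := by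
  induction l generalizing init with
  | nil => rfl
  | cons k t ih =>
      rw [List.foldl_cons, List.filter_cons, pvStepB_eq]
      by_cases h : PySem.Str.startswith k "WM" = true
      · rw [if_pos h, if_pos (by exact h), List.foldl_cons, ih]
      · rw [if_neg h, if_neg (by exact h), ih]

theorem pvOfListBeqWM (l : List Char) : (String.ofList l == "WM") = (l == ['W', 'M']) := by
  have h : (String.ofList l = "WM") ↔ (l = ['W', 'M']) := by
    constructor
    · intro h; have := congrArg String.toList h; simpa using this
    · intro h; subst h; decide
  simp [h]

theorem pvCharsPred (l : List Char) :
    (decide (2 ≤ (l.length : Int)) && (String.ofList (l.take 2) == "WM"))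
      = PySem.Chars.startswith l ['W', 'M'] := by
  rw [pvOfListBeqWM]
  match l with
  | [] => simp [PySem.Chars.startswith]
  | [a] => simp [PySem.Chars.startswith, List.isPrefixOf]
  | a :: b :: t =>
      by_cases ha : a = 'W' <;> by_cases hb : b = 'M' <;>
        simp [PySem.Chars.startswith, List.isPrefixOf, ha, hb] <;>
        · have h2 : decide ((2:Int) ≤ (t.length:Int) + 1 + 1) = true := by
            simp; omega
          first
          | omega
          | simp [h2, BEq.comm]

theorem pvPred_eq (k : String) :
    (decide (2 ≤ PySem.Str.len k) && (PySem.Str.slice k none (some 2) == "WM"))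
      = PySem.Str.startswith k "WM" := by
  simp only [PySem.Str.len_eq, PySem.Str.startswith_eq, PySem.Str.slice]
  rw [PySem.Chars.slice_eq_listSlice, show (2:Int) = ((2:Nat):Int) from rfl,
    PySem.List.slice_to_natCast]
  rw [show "WM".toList = ['W','M'] by decide]
  exact pvCharsPred k.toList

theorem pvStep2_insertBy (st : List String) (k : String) :
    pvStep2 (pvFirstTwo st) k
      = pvFirstTwo (PySem.List.insertBy (fun a b => decide (a < b)) k st) := by
  match st with
  | [] => simp [pvStep2, pvFirstTwo, PySem.List.insertBy]
  | [a] =>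
      by_cases h : k < a <;> simp [pvStep2, pvFirstTwo, PySem.List.insertBy, h]
  | a :: b :: t =>
      by_cases h1 : k < a
      · simp [pvStep2, pvFirstTwo, PySem.List.insertBy, h1]
      · by_cases h2 : k < b <;> simp [pvStep2, pvFirstTwo, PySem.List.insertBy, h1, h2]

theorem pvFold_firstTwo (l s : List String) :
    l.foldl pvStep2 (pvFirstTwo s)
      = pvFirstTwo (l.foldl (fun acc x => PySem.List.insertBy (fun a b => decide (a < b)) x acc) s) := by
  induction l generalizing s with
  | nil => rfl
  | cons k t ih => simpa [List.foldl, pvStep2_insertBy] using ih (PySem.List.insertBy (fun a b => decide (a < b)) k s)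

-- ===== VERDICT (by name: the statement is the Claim_ definition above) =====
theorem get_vive_wrist_ids_spec : Claim_equal_get_vive_wrist_ids := by
  intro vive_data _
  unfold Spec_get_vive_wrist_ids get_vive_wrist_ids get_vive_wrist_ids_alt
  rw [pvFoldB_filter]
  have hfilt : ((PySem.Dict.ofList vive_data).keys).filter (fun k => PySem.Str.startswith k "WM")
      = ((PySem.Dict.ofList vive_data).keys).filter
          (fun k => decide (2 ≤ PySem.Str.len k) && (PySem.Str.slice k none (some 2) == "WM")) := by
    apply List.filter_congr
    intro k _
    rw [pvPred_eq]
  rw [hfilt]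
  rw [show ((none, none) : Option String × Option String) = pvFirstTwo [] from rfl]
  rw [pvFold_firstTwo]
  rw [← PySem.List.sorted_eq_foldl_insertBy]
  rfl
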